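-- pv_equiv track=rewrite | github.com/sonpham-org/arc-agi-3 | agent.py | compute_color_histogram
-- ===== SOURCE A (Python) =====
-- COLOR_NAMES = {
--     0: "White", 1: "LightGray", 2: "Gray", 3: "DarkGray",
--     4: "VeryDarkGray", 5: "Black", 6: "Magenta", 7: "LightMagenta",
--     8: "Red", 9: "Blue", 10: "LightBlue", 11: "Yellow",
--     12: "Orange", 13: "Maroon", 14: "Green", 15: "Purple",
-- }
--
-- def compute_color_histogram(grid: list) -> str:
--     if not grid:
--         return ""
--     counts: dict[int, int] = {}
--     for row in grid:
--         for v in row: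
--             counts[v] = counts.get(v, 0) + 1
--     lines = [
--         f"  {v}={COLOR_NAMES.get(v, str(v))}: {cnt}"
--         for v, cnt in sorted(counts.items())
--     ]
--     return "\n## COLOR HISTOGRAM\n" + "\n".join(lines)
-- ===== SOURCE B (Python) =====
-- COLOR_NAMES = {
--     0: "White", 1: "LightGray", 2: "Gray", 3: "DarkGray",
--     4: "VeryDarkGray", 5: "Black", 6: "Magenta", 7: "LightMagenta",
--     8: "Red", 9: "Blue", 10: "LightBlue", 11: "Yellow",
--     12: "Orange", 13: "Maroon", 14: "Green", 15: "Purple",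
-- }
--
-- def compute_color_histogram(grid: list) -> str:
--     if not grid:
--         return ""
--     cells = sorted(v for row in grid for v in row)
--     lines = []
--     i, n = 0, len(cells)
--     while i < n:
--         v = cells[i]
--         j = i
--         while j < n and cells[j] == v:
--             j += 1
--         lines.append(f"  {v}={COLOR_NAMES.get(v, str(v))}: {j - i}")
--         i = j
--     return "\n## COLOR HISTOGRAM\n" + "\n".join(lines)
-- ===== Notes on version B (the rewrite author's own statement) =====
-- stated objective: alternative
-- what changed: Replaces the dict-count-then-sort-keys strategy by flattening the grid, sorting the cell values once, and emitting one line per run of equal values in a single grouped scan (no dictionary at all).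
import Mathlib
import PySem

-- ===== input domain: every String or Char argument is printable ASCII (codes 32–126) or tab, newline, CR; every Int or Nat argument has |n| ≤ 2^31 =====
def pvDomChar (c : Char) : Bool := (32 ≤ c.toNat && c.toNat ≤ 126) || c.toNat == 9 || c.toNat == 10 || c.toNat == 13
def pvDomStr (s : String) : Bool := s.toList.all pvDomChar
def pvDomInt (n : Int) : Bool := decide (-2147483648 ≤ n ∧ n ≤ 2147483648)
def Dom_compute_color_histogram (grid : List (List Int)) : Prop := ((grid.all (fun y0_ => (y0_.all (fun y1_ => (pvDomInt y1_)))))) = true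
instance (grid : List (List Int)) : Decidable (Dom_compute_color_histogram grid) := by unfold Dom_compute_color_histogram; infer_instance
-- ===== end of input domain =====

-- B replaces the dict-count-then-sort-keys strategy with flatten, sort once, and a single
-- grouped scan over runs of equal values (no dictionary); same output, similar cost.


-- ===== PORT A =====
-- COLOR_NAMES module constant
def COLOR_NAMES : PySem.Dict Int String :=
  PySem.Dict.ofList [(0, "White"), (1, "LightGray"), (2, "Gray"), (3, "DarkGray"),
    (4, "VeryDarkGray"), (5, "Black"), (6, "Magenta"), (7, "LightMagenta"),
    (8, "Red"), (9, "Blue"), (10, "LightBlue"), (11, "Yellow"),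
    (12, "Orange"), (13, "Maroon"), (14, "Green"), (15, "Purple")]

-- the f-string "  {v}={COLOR_NAMES.get(v, str(v))}: {cnt}" (identical in A and B)
def fmtLine (p : Int × Int) : String :=
  "  " ++ PySem.Int.toStr p.1 ++ "=" ++ COLOR_NAMES.getD p.1 (PySem.Int.toStr p.1)
    ++ ": " ++ PySem.Int.toStr p.2

def compute_color_histogram (grid : List (List Int)) : String :=
  if grid = [] then ""
  else
    -- sorted(counts.items()): tuple (lexicographic) comparison of the (key, count) pairs
    "\n## COLOR HISTOGRAM\n" ++ PySem.Str.join "\n"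
      ((PySem.List.sorted2
          (grid.foldl (fun d row => row.foldl (fun d v => d.insert v (d.getD v 0 + 1)) d)
            PySem.Dict.empty).items
          (fun p => p.1) (fun p => p.2)).map fmtLine)

-- ===== PORT B =====
-- the inner while loop of Source B: one run of equal values at the front of the remaining
-- sorted cells, then recurse on the rest (i/j index arithmetic becomes takeWhile/dropWhile)
def groupRuns : List Int → List (Int × Int)
  | [] => []
  | v :: xs =>
      (v, (1 : Int) + (xs.takeWhile (fun x => x == v)).length)
        :: groupRuns (xs.dropWhile (fun x => x == v))
  termination_by l => l.length
  decreasing_by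
    simp only [List.length_cons]
    exact Nat.lt_succ_of_le (List.length_dropWhile_le _ _)

def compute_color_histogram_alt (grid : List (List Int)) : String :=
  if grid = [] then ""
  else
    "\n## COLOR HISTOGRAM\n" ++ PySem.Str.join "\n"
      ((groupRuns (PySem.List.sorted (grid.flatMap id) (fun v => v))).map fmtLine)

-- ===== PRECONDITION & SPEC =====
def Spec_compute_color_histogram (grid : List (List Int)) (out : String) : Prop := out = compute_color_histogram_alt grid
instance (grid : List (List Int)) (out : String) : Decidable (Spec_compute_color_histogram grid out) := by unfold Spec_compute_color_histogram; infer_instance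

-- ===== CLAIM (what is proved, stated in full; the proofs are below) =====
def Claim_equal_compute_color_histogram : Prop := ∀ (grid : List (List Int)), Dom_compute_color_histogram grid → Spec_compute_color_histogram grid (compute_color_histogram grid)

-- ===== LEMMAS AND PROOFS =====

-- A's nested counting loop builds Counter(flattened grid)
lemma counts_eq_counter (grid : List (List Int)) :
    grid.foldl (fun d row => row.foldl (fun d v => d.insert v (d.getD v 0 + 1)) d)
      PySem.Dict.empty = PySem.Dict.counter grid.flatten := by
  rw [← List.foldl_flatten, PySem.Dict.foldl_insert_getD_add_one_eq_counter]

-- Python's tuple comparison in sorted(items) is the lexicographic order on Int × Int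
lemma before_eq_lex (a b : Int × Int) :
    (decide (a.1 < b.1) || (!decide (b.1 < a.1) && decide (a.2 < b.2)))
      = decide (toLex a < toLex b) := by
  by_cases h1 : a.1 < b.1 <;> by_cases h2 : b.1 < a.1 <;> by_cases h3 : a.2 < b.2 <;>
    simp [Prod.Lex.lt_iff, h1, h2, h3] <;> omega

lemma sorted2_eq_sorted_lex (xs : List (Int × Int)) :
    PySem.List.sorted2 xs (fun p => p.1) (fun p => p.2)
      = PySem.List.sorted xs (fun p => toLex p) := by
  rw [PySem.List.sorted_eq_foldl_insertBy]
  unfold PySem.List.sorted2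
  simp only [if_neg (by decide : ¬ ((false : Bool) = true))]
  congr 1
  funext acc x
  congr 1
  funext a b
  exact before_eq_lex a b

-- every element surviving dropWhile (== v) in a nondecreasing list is strictly above v
lemma lt_of_mem_dropWhile (v : Int) :
    ∀ xs : List Int, (∀ y ∈ xs, v ≤ y) → xs.Pairwise (· ≤ ·) →
      ∀ y ∈ xs.dropWhile (fun x => x == v), v < y := by
  intro xs
  induction xs with
  | nil => intro _ _ y hy; simp at hy
  | cons x xs ih =>
    intro hle hpw y hy
    rw [List.dropWhile_cons] at hy
    by_cases hx : x = v
    · rw [if_pos (by simp [hx])] at hy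
      exact ih (fun y hy => hle y (List.mem_cons_of_mem _ hy)) hpw.tail y hy
    · rw [if_neg (by simp [hx])] at hy
      have hvx : v < x := lt_of_le_of_ne (hle x (List.mem_cons_self)) (Ne.symm hx)
      rcases List.mem_cons.mp hy with rfl | hy
      · exact hvx
      · exact lt_of_lt_of_le hvx (List.rel_of_pairwise_cons hpw hy)

lemma count_takeWhile_self (v : Int) (xs : List Int) :
    (xs.takeWhile (fun x => x == v)).count v = (xs.takeWhile (fun x => x == v)).length := by
  apply List.count_eq_length.mpr
  intro y hy
  have h := List.mem_takeWhile_imp (p := fun x => x == v) hy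
  simp at h
  omega

lemma count_takeWhile_ne (v w : Int) (hw : w ≠ v) (xs : List Int) :
    (xs.takeWhile (fun x => x == v)).count w = 0 := by
  apply List.count_eq_zero.mpr
  intro hmem
  exact hw (by simpa using List.mem_takeWhile_imp hmem)

lemma count_split (v w : Int) (xs : List Int) :
    xs.count w = (xs.takeWhile (fun x => x == v)).count w
      + (xs.dropWhile (fun x => x == v)).count w := by
  conv_lhs => rw [← List.takeWhile_append_dropWhile (p := fun x => x == v) (l := xs)]
  rw [List.count_append]

-- membership/count characterisation of the grouped scan on a nondecreasing list
lemma mem_groupRuns (l : List Int) (hs : l.Pairwise (· ≤ ·)) (k : Int) (c : Int) :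
    (k, c) ∈ groupRuns l ↔ k ∈ l ∧ c = (l.count k : Int) := by
  induction l using groupRuns.induct with
  | case1 => simp [groupRuns]
  | case2 v xs ih =>
    have hle : ∀ y ∈ xs, v ≤ y := fun y hy => List.rel_of_pairwise_cons hs hy
    have hdrop_gt : ∀ y ∈ xs.dropWhile (fun x => x == v), v < y :=
      lt_of_mem_dropWhile v xs hle hs.tail
    have hdrop_pw : (xs.dropWhile (fun x => x == v)).Pairwise (· ≤ ·) :=
      hs.tail.sublist (List.dropWhile_sublist _)
    have ih' := ih hdrop_pw
    have hcv : (v :: xs).count v = 1 + (xs.takeWhile (fun x => x == v)).length := by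
      rw [List.count_cons_self, count_split v v xs, count_takeWhile_self,
        List.count_eq_zero.mpr (fun h => lt_irrefl v (hdrop_gt v h))]
      omega
    rw [groupRuns]
    constructor
    · intro hmem
      rcases List.mem_cons.mp hmem with heq | hmem'
      · obtain ⟨rfl, rfl⟩ : k = v ∧ c = (1 : Int) + (xs.takeWhile (fun x => x == v)).length := by
          constructor <;> [exact congrArg Prod.fst heq; exact congrArg Prod.snd heq]
        refine ⟨List.mem_cons_self, ?_⟩
        rw [hcv]; push_cast; ring
      · obtain ⟨hk, hc⟩ := ih'.mp hmem'
        have hkv : k ≠ v := fun h => lt_irrefl v (h ▸ hdrop_gt k hk)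
        have : (v :: xs).count k = (xs.dropWhile (fun x => x == v)).count k := by
          have h1 := count_split v k xs
          rw [count_takeWhile_ne v k hkv] at h1
          simpa [List.count_cons, Ne.symm hkv] using h1
        refine ⟨List.mem_cons_of_mem _ ?_, by rw [this]; exact hc⟩
        exact (List.dropWhile_sublist _).mem hk
    · rintro ⟨hk, rfl⟩
      by_cases hkv : k = v
      · subst hkv
        refine List.mem_cons.mpr (Or.inl ?_)
        congr 1
        rw [hcv]; push_cast; ring
      · have hk' : k ∈ xs := by
          rcases List.mem_cons.mp hk with h | h
          · exact absurd h hkv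
          · exact h
        have hkd : k ∈ xs.dropWhile (fun x => x == v) := by
          have : k ∈ xs.takeWhile (fun x => x == v) ++ xs.dropWhile (fun x => x == v) := by
            rw [List.takeWhile_append_dropWhile]; exact hk'
          rcases List.mem_append.mp this with h | h
          · exact absurd (by simpa using List.mem_takeWhile_imp h) hkv
          · exact h
        apply List.mem_cons_of_mem
        apply ih'.mpr
        refine ⟨hkd, ?_⟩
        have hck : (v :: xs).count k = (xs.dropWhile (fun x => x == v)).count k := by
          have h1 := count_split v k xs
          rw [count_takeWhile_ne v k hkv] at h1
          simpa [List.count_cons, Ne.symm hkv] using h1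
        exact congrArg (fun n : Nat => (n : Int)) hck

-- the grouped scan emits strictly increasing keys
lemma groupRuns_pairwise (l : List Int) (hs : l.Pairwise (· ≤ ·)) :
    (groupRuns l).Pairwise (fun a b => a.1 < b.1) := by
  induction l using groupRuns.induct with
  | case1 => simp [groupRuns]
  | case2 v xs ih =>
    have hle : ∀ y ∈ xs, v ≤ y := fun y hy => List.rel_of_pairwise_cons hs hy
    have hdrop_gt : ∀ y ∈ xs.dropWhile (fun x => x == v), v < y :=
      lt_of_mem_dropWhile v xs hle hs.tail
    have hdrop_pw : (xs.dropWhile (fun x => x == v)).Pairwise (· ≤ ·) :=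
      hs.tail.sublist (List.dropWhile_sublist _)
    rw [groupRuns]
    refine List.Pairwise.cons ?_ (ih hdrop_pw)
    intro b hb
    obtain ⟨hb1, _⟩ := (mem_groupRuns _ hdrop_pw b.1 b.2).mp (by simpa using hb)
    exact hdrop_gt b.1 hb1

-- the central list identity: sorted(counts.items()) = grouped scan of the sorted cells
lemma central (flat : List Int) :
    PySem.List.sorted2 (PySem.Dict.counter flat).items (fun p => p.1) (fun p => p.2)
      = groupRuns (PySem.List.sorted flat (fun v => v)) := by
  set s := PySem.List.sorted flat (fun v => v) with hsdef
  have hpw : s.Pairwise (· ≤ ·) := PySem.List.sorted_pairwise flat (fun v => v)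
  have hperm : s.Perm flat := PySem.List.sorted_perm flat (fun v => v) false
  rw [sorted2_eq_sorted_lex]
  apply PySem.List.sorted_eq_of_perm_of_pairwise_lt
  · -- groupRuns s is a permutation of counter(flat).items
    apply (List.perm_ext_iff_of_nodup ?_ ?_).mpr
    · intro a
      obtain ⟨k, c⟩ := a
      rw [mem_groupRuns s hpw k c, PySem.Dict.items_counter]
      simp only [List.mem_map, PySem.Set.mem_ofList]
      constructor
      · rintro ⟨hk, rfl⟩
        exact ⟨k, hperm.mem_iff.mp hk, by rw [hperm.count_eq]⟩
      · rintro ⟨a, ha, heq⟩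
        obtain ⟨rfl, rfl⟩ : a = k ∧ (flat.count a : Int) = c := by
          constructor <;> [exact congrArg Prod.fst heq; exact congrArg Prod.snd heq]
        exact ⟨hperm.mem_iff.mpr ha, by rw [hperm.count_eq]⟩
    · exact ((groupRuns_pairwise s hpw).imp (fun h => by
        intro he; rw [he] at h; exact lt_irrefl _ h))
    · rw [PySem.Dict.items_counter]
      exact (PySem.Set.nodup_ofList flat).map
        (fun a b h => congrArg Prod.fst h)
  · exact (groupRuns_pairwise s hpw).imp (fun h => Prod.Lex.lt_iff.mpr (Or.inl h))

-- ===== VERDICT (by name: the statement is the Claim_ definition above) =====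
theorem compute_color_histogram_spec : Claim_equal_compute_color_histogram := by
  intro grid _
  unfold Spec_compute_color_histogram compute_color_histogram compute_color_histogram_alt
  by_cases hg : grid = []
  · simp [hg]
  · rw [if_neg hg, if_neg hg]
    rw [counts_eq_counter, List.flatMap_id, central]
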